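-- pv_equiv track=rewrite | github.com/deft667788/comp9021 | quiz/quiz7/quiz_7.py | centrifuge
-- ===== SOURCE A (Python) =====
-- from math import sqrt
--
-- def sieve_of_primes_up_to(n):
--     sieve = [True] * (n + 1)
--     for p in range(2, round(sqrt(n)) + 1):
--         if sieve[p]:
--             for i in range(p * p, n + 1, p):
--                 sieve[i] = False
--     return sieve
--
-- def centrifuge(n, k):
--     if k == 0 or k == n:
--         return True
--     primes = sieve_of_primes_up_to(n)
--     if primes[n]:
--         return False
--     primes_factors = []
--     for i in range(2, n // 2 + 1):
--         if primes[i] and n % i == 0: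
--             primes_factors.append(i)
--
--     # primes_factors = prime_factor(n, primes)
--     # return primes_factors
--
--     return centrifuge_recursion(k, primes_factors) and centrifuge_recursion(n - k, primes_factors)
--
-- def centrifuge_recursion(k, factors):
--     # base case
--     if k == 1:
--         return False
--     while k > 1:
--         if k in factors:
--             return True
--         for i in range(len(factors)):
--             if k % factors[i] == 0:
--                 return True
--
--         # recursive case
--         return centrifuge_recursion(k - factors[0], factors)
--     return False
-- ===== SOURCE B (Python) =====
-- def centrifuge(n, k):
--     if k == 0 or k == n:
--         return True
--     # distinct prime factors of n by trial division (ascending)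
--     fs = []
--     m = n
--     d = 2
--     while d * d <= m:
--         if m % d == 0:
--             fs.append(d)
--             while m % d == 0:
--                 m //= d
--         d += 1
--     if m > 1:
--         fs.append(m)
--     if fs == [] or fs == [n]:
--         return False  # n prime, or n < 2: no usable factors
--     return reaches(k, fs) and reaches(n - k, fs)
--
-- def reaches(k, fs):
--     # True iff some value k, k-p0, k-2*p0, ... that is still >= 2 is divisible
--     # by a prime factor of n; decided per factor by a congruence search.
--     if k <= 1:
--         return False
--     p0 = fs[0]
--     if k % p0 == 0:
--         return True
--     for p in fs[1:]:
--         for j in range(p):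
--             if (k - j * p0) % p == 0:
--                 if k - j * p0 >= 2:
--                     return True
--                 break
--     return False
-- ===== Notes on version B (the rewrite author's own statement) =====
-- stated objective: faster
-- what changed: B replaces A's full Eratosthenes sieve up to n by O(sqrt(n)) trial division for the distinct prime factors, and replaces A's decrement-by-smallest-factor recursion (up to k/p0 deep) by a per-prime-factor congruence search for the first reachable multiple, deciding reachability directly.
import Mathlib
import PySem

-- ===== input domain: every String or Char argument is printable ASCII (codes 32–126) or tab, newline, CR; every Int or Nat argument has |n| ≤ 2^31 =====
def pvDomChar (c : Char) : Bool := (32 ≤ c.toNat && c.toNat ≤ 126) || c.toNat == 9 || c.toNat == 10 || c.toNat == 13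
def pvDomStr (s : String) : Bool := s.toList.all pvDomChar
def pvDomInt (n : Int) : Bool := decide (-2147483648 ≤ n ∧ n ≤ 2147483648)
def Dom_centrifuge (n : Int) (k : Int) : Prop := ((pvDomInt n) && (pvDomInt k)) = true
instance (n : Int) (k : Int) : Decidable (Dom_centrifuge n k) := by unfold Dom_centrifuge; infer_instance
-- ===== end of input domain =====

-- B replaces A's O(n) Eratosthenes sieve by O(√n) trial division and A's decrement-by-p0
-- recursion by a per-prime-factor congruence search; equivalence of return values is proved on Pre_.

-- ===== PORT A =====
-- The Python list `sieve` is ported as `Array Bool` (its exact model; O(1) update).  All list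
-- indices in A are nonnegative and in bounds on every use, so `.getD i.toNat` / `.setIfInBounds i.toNat` is exact
-- for `sieve[p]` / `sieve[i] = False`.  Python's `round(sqrt(n))` is ⌊√n⌋ or ⌊√n⌋+1; the port uses
-- ⌊√n⌋ (`n.toNat.sqrt`), which is exact: a possible extra outer pass at p = ⌊√n⌋+1 has p*p > n, so
-- its inner range is empty and the resulting sieve list is identical.
def sieveOfPrimesUpTo (n : Int) : Array Bool :=
  (PySem.List.pyRange 2 ((n.toNat.sqrt : Int) + 1) 1).foldl
    (fun s p =>
      if s.getD p.toNat false then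
        (PySem.List.pyRange (p * p) (n + 1) p).foldl (fun s' i => s'.setIfInBounds i.toNat false) s
      else s)
    (Array.replicate (n + 1).toNat true)

-- Fuel only makes the recursion structurally total; `centrifuge` passes `k.toNat + 1`, which is
-- enough on every call it makes (each step decreases k by factors[0] ≥ 2).  `factors.getD i 0` /
-- `factors.getD 0 0` is exact for `factors[i]` / `factors[0]`: the indices are in range whenever
-- A reaches them (factors is nonempty there).
def centrifugeRecursion : Nat → Int → List Int → Bool
  | 0, _, _ => false
  | fuel + 1, k, factors =>
    if k == 1 then false
    else if decide (1 < k) then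
      if factors.contains k then true
      else if (List.range factors.length).any (fun i => PySem.Int.mod k (factors.getD i 0) == 0) then true
      else centrifugeRecursion fuel (k - factors.getD 0 0) factors
    else false

def centrifuge (n : Int) (k : Int) : Bool :=
  if k == 0 || k == n then true
  else
    let primes := sieveOfPrimesUpTo n
    if primes.getD n.toNat false then false
    else
      let primesFactors :=
        (PySem.List.pyRange 2 (PySem.Int.floordiv n 2 + 1) 1).foldl
          (fun acc i => if primes.getD i.toNat false && (PySem.Int.mod n i == 0) then acc ++ [i] else acc) []
      centrifugeRecursion (k.toNat + 1) k primesFactors &&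
        centrifugeRecursion ((n - k).toNat + 1) (n - k) primesFactors

-- ===== PORT B =====
-- Fuel only makes Source B's `while` loops structurally total; `m.toNat` / `n.toNat + 2` steps are
-- enough on every call made below (the inner loop divides m by d ≥ 2 each step, the outer loop
-- increments d and stops once d*d > m ≥ 0).
def divOutAll : Nat → Int → Int → Int
  | 0, m, _ => m
  | fuel + 1, m, d => if PySem.Int.mod m d == 0 then divOutAll fuel (PySem.Int.floordiv m d) d else m

def trialFactor : Nat → Int → Int → List Int → List Int × Int
  | 0, m, _, fs => (fs, m)
  | fuel + 1, m, d, fs =>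
    if d * d ≤ m then
      if PySem.Int.mod m d == 0 then
        trialFactor fuel (divOutAll m.toNat m d) (d + 1) (fs ++ [d])
      else trialFactor fuel m (d + 1) fs
    else (fs, m)

-- `fs.getD 0 0` is exact for `fs[0]` (fs nonempty on every call); the inner `for j in range(p)`
-- with its first-hit `break` is the `find?` over `List.range p.toNat`.
def reaches (k : Int) (fs : List Int) : Bool :=
  if decide (k ≤ 1) then false
  else
    let p0 := fs.getD 0 0
    if PySem.Int.mod k p0 == 0 then true
    else
      (fs.drop 1).any fun p =>
        match (List.range p.toNat).find? (fun (j : Nat) => PySem.Int.mod (k - (j : Int) * p0) p == 0) with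
        | some j => decide (2 ≤ k - (j : Int) * p0)
        | none => false

def centrifuge_alt (n : Int) (k : Int) : Bool :=
  if k == 0 || k == n then true
  else
    let r := trialFactor (n.toNat + 2) n 2 []
    let fs := if decide (1 < r.2) then r.1 ++ [r.2] else r.1
    if fs == [] || fs == [n] then false
    else reaches k fs && reaches (n - k) fs

-- ===== PRECONDITION & SPEC =====
-- Pre_ excludes exactly the inputs with n < 0 and k ∉ {0, n}, on which A raises ValueError
-- ("math domain error") in sqrt(n); A returns normally everywhere else in the domain.
def Pre_centrifuge (n : Int) (k : Int) : Prop := k = 0 ∨ k = n ∨ 0 ≤ n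
instance (n : Int) (k : Int) : Decidable (Pre_centrifuge n k) := by unfold Pre_centrifuge; infer_instance
def pvWitness_centrifuge : Int × Int := (6, 2)

def Spec_centrifuge (n : Int) (k : Int) (out : Bool) : Prop := out = centrifuge_alt n k
instance (n : Int) (k : Int) (out : Bool) : Decidable (Spec_centrifuge n k out) := by unfold Spec_centrifuge; infer_instance

-- ===== CLAIM (what is proved, stated in full; the proofs are below) =====
def Claim_equal_centrifuge : Prop := ∀ (n : Int) (k : Int), Dom_centrifuge n k → Pre_centrifuge n k → Spec_centrifuge n k (centrifuge n k)

-- ===== LEMMAS AND PROOFS =====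

lemma getD_set_false (s : List Bool) (i j : Nat) :
    ((s.set i false).getD j false = true) ↔ (¬ (i = j ∧ j < s.length) ∧ s.getD j false = true) := by
  rw [List.getD_eq_getElem?_getD, List.getD_eq_getElem?_getD, List.getElem?_set]
  by_cases hij : i = j
  · subst hij
    by_cases hl : i < s.length
    · simp [hl]
    · simp [hl]
  · simp [hij]

lemma setFold_length (l : List Int) (s : List Bool) :
    (l.foldl (fun s' i => s'.set i.toNat false) s).length = s.length := by
  induction l generalizing s with
  | nil => rfl
  | cons a t ih => simp [List.foldl_cons, ih]

lemma setFold_getD (l : List Int) (s : List Bool) (j : Nat) :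
    ((l.foldl (fun s' i => s'.set i.toNat false) s).getD j false = true) ↔
      (¬ (∃ i ∈ l, i.toNat = j ∧ j < s.length) ∧ s.getD j false = true) := by
  induction l generalizing s with
  | nil => simp
  | cons a t ih =>
    rw [List.foldl_cons, ih, getD_set_false]
    simp only [List.length_set, List.mem_cons]
    constructor
    · rintro ⟨hnot, hset, hval⟩
      exact ⟨by rintro ⟨i, (rfl | hi), hij⟩; exacts [hset hij, hnot ⟨i, hi, hij⟩], hval⟩
    · rintro ⟨hnot, hval⟩
      exact ⟨fun ⟨i, hi, hij⟩ => hnot ⟨i, Or.inr hi, hij⟩, fun h => hnot ⟨a, Or.inl rfl, h⟩, hval⟩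

-- List-level model of the Array sieve, with a `toList` bridge
def sieveModel (n : Int) : List Bool :=
  (PySem.List.pyRange 2 ((n.toNat.sqrt : Int) + 1) 1).foldl
    (fun s p =>
      if s.getD p.toNat false then
        (PySem.List.pyRange (p * p) (n + 1) p).foldl (fun s' i => s'.set i.toNat false) s
      else s)
    (List.replicate (n + 1).toNat true)

lemma arr_getD_toList (a : Array Bool) (i : Nat) (d : Bool) : a.getD i d = a.toList.getD i d := by
  rw [Array.getD_eq_getD_getElem?, List.getD_eq_getElem?_getD, ← Array.getElem?_toList]

lemma setFoldArr_toList (l : List Int) (a : Array Bool) :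
    (l.foldl (fun s' i => s'.setIfInBounds i.toNat false) a).toList
      = l.foldl (fun s' i => s'.set i.toNat false) a.toList := by
  induction l generalizing a with
  | nil => rfl
  | cons x t ih => simp [List.foldl_cons, ih, Array.toList_setIfInBounds]

lemma sieve_toList (n : Int) : (sieveOfPrimesUpTo n).toList = sieveModel n := by
  rw [sieveOfPrimesUpTo, sieveModel, ← Array.toList_replicate (n := (n + 1).toNat) (a := true)]
  generalize Array.replicate (n + 1).toNat true = a
  induction PySem.List.pyRange 2 ((n.toNat.sqrt : Int) + 1) 1 generalizing a with
  | nil => rfl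
  | cons x t ih =>
    rw [List.foldl_cons, List.foldl_cons, ih]
    congr 1
    rw [arr_getD_toList]
    by_cases h : a.toList.getD x.toNat false
    · rw [if_pos h, if_pos h, setFoldArr_toList]
    · rw [if_neg h, if_neg h]

lemma sieveArr_getD (n : Int) (j : Nat) :
    (sieveOfPrimesUpTo n).getD j false = (sieveModel n).getD j false := by
  rw [arr_getD_toList, sieve_toList]

def sieveStep (n : Int) (s : List Bool) (p : Int) : List Bool :=
  if s.getD p.toNat false then
    (PySem.List.pyRange (p * p) (n + 1) p).foldl (fun s' i => s'.set i.toNat false) s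
  else s

def sieveAux (n : Int) (t : Nat) : List Bool :=
  (PySem.List.pyRange 2 ((t : Int) + 1) 1).foldl (sieveStep n) (List.replicate (n + 1).toNat true)

lemma sieve_eq_sieveAux (n : Int) : sieveModel n = sieveAux n n.toNat.sqrt := rfl

lemma sieveAux_succ (n : Int) (t : Nat) (ht : 1 ≤ t) :
    sieveAux n (t + 1) = sieveStep n (sieveAux n t) ((t : Int) + 1) := by
  unfold sieveAux
  have h : PySem.List.pyRange 2 (((t + 1 : Nat) : Int) + 1) =
      PySem.List.pyRange 2 ((t : Int) + 1) ++ [((t : Int) + 1)] := by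
    have h2 : (2 : Int) ≤ (t : Int) + 1 := by exact_mod_cast Nat.succ_le_succ ht
    have := PySem.List.pyRange_one_succ_right h2
    rw [← this]
    norm_num
  rw [h, List.foldl_append, List.foldl_cons, List.foldl_nil]

def Marked (t j : Nat) : Prop := ∃ q : Nat, q.Prime ∧ q ≤ t ∧ q * q ≤ j ∧ q ∣ j

lemma marked_iff_not_prime (t : Nat) (ht : 1 ≤ t) :
    Marked t (t + 1) ↔ ¬ (t + 1).Prime := by
  constructor
  · rintro ⟨q, hqp, hqle, hqsq, hqd⟩ hp
    rcases (Nat.Prime.eq_one_or_self_of_dvd hp q hqd) with h | h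
    · exact Nat.Prime.one_lt hqp |>.ne' (by omega)
    · omega
  · intro hp
    refine ⟨(t + 1).minFac, Nat.minFac_prime (by omega), ?_, ?_, Nat.minFac_dvd _⟩
    · have hsq : (t + 1).minFac ^ 2 ≤ t + 1 := Nat.minFac_sq_le_self (by omega) hp
      have h2 : 2 ≤ (t + 1).minFac := (Nat.minFac_prime (by omega : t + 1 ≠ 1)).two_le
      nlinarith
    · have := Nat.minFac_sq_le_self (show 0 < t + 1 by omega) hp
      nlinarith

lemma sieveAux_inv (n : Int) (hn : 2 ≤ n) (t : Nat) (ht : 1 ≤ t) (htn : t ≤ n.toNat) :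
    (sieveAux n t).length = (n + 1).toNat ∧
      ∀ j ≤ n.toNat, ((sieveAux n t).getD j false = true ↔ ¬ Marked t j) := by
  induction t with
  | zero => omega
  | succ t ih =>
    rcases Nat.eq_or_lt_of_le ht with h1 | h1
    · -- t + 1 = 1
      have : t = 0 := by omega
      subst this
      constructor
      · unfold sieveAux
        rw [show ((1 : Nat) : Int) + 1 = 2 by norm_num, PySem.List.pyRange_one_eq_nil (le_refl 2)]
        simp
      · intro j hj
        unfold sieveAux
        rw [show ((1 : Nat) : Int) + 1 = 2 by norm_num, PySem.List.pyRange_one_eq_nil (le_refl 2)]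
        simp only [List.foldl_nil]
        rw [List.getD_eq_getElem?_getD, List.getElem?_replicate]
        have hjlt : j < (n + 1).toNat := by omega
        simp [hjlt, Marked]
        intro q hq h1 h2 h3
        have := hq.two_le
        omega
    · -- t ≥ 1
      have ht1 : 1 ≤ t := by omega
      obtain ⟨ihlen, ihval⟩ := ih ht1 (by omega)
      rw [sieveAux_succ n t ht1]
      have htoNat : ((t : Int) + 1).toNat = t + 1 := by omega
      have hguard : ((sieveAux n t).getD ((t : Int) + 1).toNat false = true) ↔ ¬ Marked t (t + 1) := by
        rw [htoNat]; exact ihval (t + 1) (by omega)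
      unfold sieveStep
      by_cases hp : (t + 1).Prime
      · -- guard true, marking happens
        have hg : (sieveAux n t).getD ((t : Int) + 1).toNat false = true := by
          rw [hguard, marked_iff_not_prime t ht1]; exact fun h => h hp
        rw [hg, if_pos rfl]
        constructor
        · rw [setFold_length, ihlen]
        · intro j hj
          rw [setFold_getD, ihval j hj]
          have hT : ((t : Int) + 1) = ((t + 1 : Nat) : Int) := by push_cast; ring
          have hmem : (∃ i ∈ PySem.List.pyRange (((t : Int) + 1) * ((t : Int) + 1)) (n + 1) ((t : Int) + 1),
              i.toNat = j ∧ j < (sieveAux n t).length) ↔ ((t + 1) * (t + 1) ≤ j ∧ (t + 1) ∣ j) := by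
            rw [ihlen]
            constructor
            · rintro ⟨i, hi, rfl, hlen⟩
              rw [PySem.List.mem_pyRange_iff_of_pos (by positivity)] at hi
              obtain ⟨hia, hib, hid⟩ := hi
              have hi0 : 0 ≤ i := le_trans (by positivity) hia
              have hdvd : ((t : Int) + 1) ∣ i := by
                have := dvd_add hid (Dvd.intro ((t : Int) + 1) rfl)
                simpa using this
              have hieq : i = (i.toNat : Int) := (Int.toNat_of_nonneg hi0).symm
              constructor
              · have : (((t + 1) * (t + 1) : Nat) : Int) ≤ ((i.toNat : Nat) : Int) := by
                  rw [← hieq]; push_cast; linarith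
                exact_mod_cast this
              · have : (((t + 1 : Nat)) : Int) ∣ ((i.toNat : Nat) : Int) := by
                  rw [← hieq, ← hT]; exact hdvd
                exact_mod_cast this
            · rintro ⟨hsq, hdvd⟩
              refine ⟨(j : Int), ?_, by omega, by omega⟩
              rw [PySem.List.mem_pyRange_iff_of_pos (by positivity)]
              refine ⟨by exact_mod_cast hsq, by omega, ?_⟩
              have h1 : ((t : Int) + 1) ∣ (j : Int) := by
                rw [hT]; exact_mod_cast hdvd
              exact dvd_sub h1 (Dvd.intro ((t : Int) + 1) rfl)
          rw [hmem]
          have hsplit : Marked (t + 1) j ↔ (Marked t j ∨ ((t + 1) * (t + 1) ≤ j ∧ (t + 1) ∣ j)) := by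
            constructor
            · rintro ⟨q, hqp, hqle, hqsq, hqd⟩
              rcases Nat.eq_or_lt_of_le hqle with h | h
              · exact Or.inr ⟨h ▸ hqsq, h ▸ hqd⟩
              · exact Or.inl ⟨q, hqp, by omega, hqsq, hqd⟩
            · rintro (⟨q, hqp, hqle, hqsq, hqd⟩ | ⟨h1, h2⟩)
              · exact ⟨q, hqp, by omega, hqsq, hqd⟩
              · exact ⟨t + 1, hp, le_refl _, h1, h2⟩
          rw [hsplit]
          tauto
      · -- guard false
        have hg : (sieveAux n t).getD ((t : Int) + 1).toNat false = false := by
          have := hguard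
          rw [marked_iff_not_prime t ht1] at this
          rcases Bool.eq_false_or_eq_true ((sieveAux n t).getD ((t : Int) + 1).toNat false) with h | h
          · exact absurd (this.mp h) (by simpa using hp)
          · exact h
        rw [hg]
        simp only [Bool.false_eq_true, if_false]
        refine ⟨ihlen, fun j hj => ?_⟩
        rw [ihval j hj]
        constructor
        · rintro hnm ⟨q, hqp, hqle, hqsq, hqd⟩
          exact hnm ⟨q, hqp, by
            rcases Nat.eq_or_lt_of_le hqle with h | h
            · exact absurd (h ▸ hqp) hp
            · omega, hqsq, hqd⟩
        · rintro hnm ⟨q, hqp, hqle, hqsq, hqd⟩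
          exact hnm ⟨q, hqp, by omega, hqsq, hqd⟩

lemma sieve_spec (n : Int) (hn : 2 ≤ n) (j : Nat) (hj : j ≤ n.toNat) :
    ((sieveOfPrimesUpTo n).getD j false = true) ↔ (j < 2 ∨ j.Prime) := by
  rw [sieveArr_getD, sieve_eq_sieveAux]
  have h1 : 1 ≤ n.toNat.sqrt := by
    rw [Nat.le_sqrt]; omega
  obtain ⟨hlen, hval⟩ := sieveAux_inv n hn n.toNat.sqrt h1 (Nat.sqrt_le_self _)
  rw [hval j hj]
  constructor
  · intro h
    by_contra hc
    push_neg at hc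
    obtain ⟨h2, hnp⟩ := hc
    refine h ⟨j.minFac, Nat.minFac_prime (by omega), ?_, ?_, Nat.minFac_dvd _⟩
    · rw [Nat.le_sqrt]
      have := Nat.minFac_sq_le_self (by omega : 0 < j) hnp
      nlinarith
    · have := Nat.minFac_sq_le_self (by omega : 0 < j) hnp
      nlinarith
  · rintro h ⟨q, hqp, hqle, hqsq, hqd⟩
    have hq2 := hqp.two_le
    rcases h with h | h
    · nlinarith
    · rcases h.eq_one_or_self_of_dvd q hqd with h1 | h1
      · omega
      · subst h1; nlinarith [h.two_le]

def primesList (x : Int) : List Int :=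
  List.map (fun (q : Nat) => (q : Int))
    ((List.range (x.toNat + 1)).filter (fun q => decide (Nat.Prime q) && decide ((q : Int) ∣ x)))

lemma mem_primesList (x m : Int) (hm : 1 ≤ m) :
    x ∈ primesList m ↔ (0 ≤ x ∧ x.toNat.Prime ∧ x ∣ m) := by
  rw [primesList]
  simp only [List.mem_map, List.mem_filter, List.mem_range, Bool.and_eq_true, decide_eq_true_eq]
  constructor
  · rintro ⟨q, ⟨hqlt, hqp, hqd⟩, rfl⟩
    exact ⟨Int.natCast_nonneg q, by simpa using hqp, hqd⟩
  · rintro ⟨hx0, hxp, hxd⟩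
    refine ⟨x.toNat, ⟨?_, hxp, ?_⟩, Int.toNat_of_nonneg hx0⟩
    · have hxm : x ≤ m := Int.le_of_dvd (by omega) hxd
      have h2 : 2 ≤ x.toNat := hxp.two_le
      omega
    · rwa [Int.toNat_of_nonneg hx0]

lemma pairwise_primesList (m : Int) : (primesList m).Pairwise (· < ·) := by
  rw [primesList]
  refine List.Pairwise.map _ (fun a b h => by exact_mod_cast h) ?_
  exact List.Pairwise.sublist List.filter_sublist List.pairwise_lt_range

lemma sorted_lt_ext : ∀ {l1 l2 : List Int}, l1.Pairwise (· < ·) → l2.Pairwise (· < ·) →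
    (∀ x, x ∈ l1 ↔ x ∈ l2) → l1 = l2 := by
  intro l1
  induction l1 with
  | nil =>
    intro l2 _ _ hmem
    cases l2 with
    | nil => rfl
    | cons b t2 => exact absurd ((hmem b).mpr (List.mem_cons_self)) (List.not_mem_nil)
  | cons a t1 ih =>
    intro l2 h1 h2 hmem
    cases l2 with
    | nil => exact absurd ((hmem a).mp (List.mem_cons_self)) (List.not_mem_nil)
    | cons b t2 =>
      have hab : a = b := by
        rcases List.mem_cons.mp ((hmem a).mp (List.mem_cons_self)) with h | h
        · exact h
        · rcases List.mem_cons.mp ((hmem b).mpr (List.mem_cons_self)) with h' | h'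
          · exact h'.symm
          · exact absurd (lt_trans ((List.pairwise_cons.mp h2).1 a h)
              ((List.pairwise_cons.mp h1).1 b h')) (lt_irrefl b)
      subst hab
      have : t1 = t2 := by
        apply ih (List.pairwise_cons.mp h1).2 (List.pairwise_cons.mp h2).2
        intro x
        constructor
        · intro hx
          have hne : x ≠ a := fun h => absurd ((List.pairwise_cons.mp h1).1 x hx) (h ▸ lt_irrefl x)
          rcases List.mem_cons.mp ((hmem x).mp (List.mem_cons_of_mem a hx)) with h | h
          exacts [absurd h hne, h]
        · intro hx
          have hne : x ≠ a := fun h => absurd ((List.pairwise_cons.mp h2).1 x hx) (h ▸ lt_irrefl x)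
          rcases List.mem_cons.mp ((hmem x).mpr (List.mem_cons_of_mem a hx)) with h | h
          exacts [absurd h hne, h]
      rw [this]

lemma factors_A_eq (n : Int) (hn : 2 ≤ n) (hcomp : ¬ n.toNat.Prime) :
    (PySem.List.pyRange 2 (PySem.Int.floordiv n 2 + 1) 1).foldl
        (fun acc i => if (sieveOfPrimesUpTo n).getD i.toNat false && (PySem.Int.mod n i == 0) then acc ++ [i] else acc) []
      = primesList n := by
  rw [PySem.List.foldl_append_if_eq_filter, List.nil_append]
  apply sorted_lt_ext
  · exact List.Pairwise.sublist List.filter_sublist (PySem.List.pairwise_lt_pyRange_one 2 _)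
  · exact pairwise_primesList n
  intro x
  rw [List.mem_filter, PySem.List.mem_pyRange_one, mem_primesList x n (by omega)]
  have hfd : PySem.Int.floordiv n 2 ≤ n := by
    rw [PySem.Int.floordiv_eq_ediv_of_pos (by norm_num)]
    exact Int.ediv_le_self 2 (by omega)
  constructor
  · rintro ⟨⟨hx2, hxlt⟩, hcond⟩
    rw [Bool.and_eq_true] at hcond
    obtain ⟨hsieve, hmod⟩ := hcond
    have hdvd : x ∣ n := (PySem.Int.mod_eq_zero_iff_dvd n x).mp (by simpa using hmod)
    have hxn : x.toNat ≤ n.toNat := by omega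
    have := (sieve_spec n hn x.toNat hxn).mp hsieve
    refine ⟨by omega, ?_, hdvd⟩
    rcases this with h | h
    · omega
    · exact h
  · rintro ⟨hx0, hxp, hxd⟩
    have hx2 : 2 ≤ x := by
      have := hxp.two_le; omega
    obtain ⟨c, hc⟩ := hxd
    have hc2 : 2 ≤ c := by
      have hcpos : 1 ≤ c := by nlinarith
      rcases eq_or_lt_of_le hcpos with h1 | h1
      · exfalso
        apply hcomp
        have hnx : n = x := by rw [hc, ← h1, mul_one]
        rw [hnx]
        exact hxp
      · omega
    have hxle : x ≤ PySem.Int.floordiv n 2 := by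
      rw [PySem.Int.le_floordiv_iff_mul_le (by norm_num)]
      nlinarith
    refine ⟨⟨hx2, by omega⟩, ?_⟩
    rw [Bool.and_eq_true]
    constructor
    · rw [sieve_spec n hn x.toNat (by omega)]
      exact Or.inr hxp
    · simp [PySem.Int.mod_eq_zero_iff_dvd, hc]

lemma primesList_one : primesList 1 = [] := by decide

lemma primesList_self_of_prime (m : Int) (hm : 2 ≤ m) (hp : m.toNat.Prime) :
    primesList m = [m] := by
  apply sorted_lt_ext (pairwise_primesList m) (List.pairwise_singleton _ _)
  intro x
  rw [mem_primesList x m (by omega), List.mem_singleton]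
  constructor
  · rintro ⟨hx0, hxp, hxd⟩
    have hxd' : x.toNat ∣ m.toNat := by
      have h : ((x.toNat : Nat) : Int) ∣ ((m.toNat : Nat) : Int) := by
        rw [Int.toNat_of_nonneg hx0, Int.toNat_of_nonneg (by omega : (0:Int) ≤ m)]
        exact hxd
      exact_mod_cast h
    rcases hp.eq_one_or_self_of_dvd _ hxd' with h | h
    · exact absurd (h ▸ hxp) Nat.not_prime_one
    · omega
  · rintro rfl
    exact ⟨by omega, hp, dvd_refl _⟩

lemma divOutAll_spec (fuel : Nat) : ∀ (m d : Int), 2 ≤ d → 1 ≤ m → m.toNat ≤ fuel →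
    ∃ e : Nat, m = divOutAll fuel m d * d ^ e ∧ ¬ (d ∣ divOutAll fuel m d) ∧ 1 ≤ divOutAll fuel m d := by
  induction fuel with
  | zero => intro m d _ hm hf; omega
  | succ f ih =>
    intro m d h2 hm hf
    have hstep : divOutAll (f + 1) m d =
        if PySem.Int.mod m d == 0 then divOutAll f (PySem.Int.floordiv m d) d else m := rfl
    by_cases hdvd : d ∣ m
    · have hbeq : (PySem.Int.mod m d == 0) = true := by
        rw [beq_iff_eq]; exact (PySem.Int.mod_eq_zero_iff_dvd m d).mpr hdvd
      obtain ⟨c, rfl⟩ := hdvd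
      have hc1 : 1 ≤ c := by nlinarith
      have hfd : PySem.Int.floordiv (d * c) d = c := by
        rw [PySem.Int.floordiv_eq_ediv_of_pos (by omega), Int.mul_ediv_cancel_left _ (by omega)]
      have hclt : c < d * c := by nlinarith
      have hf2 : c.toNat ≤ f := by omega
      rw [hstep, hbeq, if_pos rfl, hfd]
      obtain ⟨e, he, hnd, hpos⟩ := ih c d h2 hc1 hf2
      refine ⟨e + 1, ?_, hnd, hpos⟩
      calc d * c = d * (divOutAll f c d * d ^ e) := by rw [← he]
        _ = divOutAll f c d * d ^ (e + 1) := by ring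
    · have hbeq : (PySem.Int.mod m d == 0) = false := by
        rw [beq_eq_false_iff_ne]
        intro hc
        exact hdvd ((PySem.Int.mod_eq_zero_iff_dvd m d).mp hc)
      rw [hstep, hbeq]
      simp only [Bool.false_eq_true, if_false]
      exact ⟨0, by ring, hdvd, hm⟩

lemma primesList_cons (m m' d : Int) (e : Nat) (h2 : 2 ≤ d) (hdp : d.toNat.Prime)
    (heq : m = m' * d ^ e) (hnd : ¬ d ∣ m') (hm' : 1 ≤ m') (he : 1 ≤ e)
    (hall : ∀ q : Nat, q.Prime → (q : Int) ∣ m → d ≤ (q : Int)) :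
    primesList m = d :: primesList m' := by
  have hpow : (0 : Int) < d ^ e := by positivity
  have hm : 1 ≤ m := by nlinarith
  have hddvd : d ∣ m := by
    rw [heq]
    exact Dvd.dvd.mul_left (dvd_pow_self d (by omega)) m'
  have hm'dvd : m' ∣ m := ⟨d ^ e, heq⟩
  apply sorted_lt_ext (pairwise_primesList m)
  · rw [List.pairwise_cons]
    refine ⟨fun x hx => ?_, pairwise_primesList m'⟩
    rw [mem_primesList x m' hm'] at hx
    obtain ⟨hx0, hxp, hxd⟩ := hx
    have hxm : ((x.toNat : Nat) : Int) ∣ m := by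
      rw [Int.toNat_of_nonneg hx0]; exact hxd.trans hm'dvd
    have hdx : d ≤ x := by
      have := hall x.toNat hxp hxm
      omega
    rcases eq_or_lt_of_le hdx with h | h
    · exact absurd (h ▸ hxd) hnd
    · exact h
  intro x
  rw [mem_primesList x m hm, List.mem_cons, mem_primesList x m' hm']
  constructor
  · rintro ⟨hx0, hxp, hxd⟩
    by_cases hxe : x = d
    · exact Or.inl hxe
    · refine Or.inr ⟨hx0, hxp, ?_⟩
      have hxprime : Prime x := by
        have h := Nat.prime_iff_prime_int.mp hxp
        rwa [Int.toNat_of_nonneg hx0] at h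
      rw [heq] at hxd
      rcases hxprime.dvd_mul.mp hxd with h | h
      · exact h
      · exfalso
        have hxdd : x ∣ d := hxprime.dvd_of_dvd_pow h
        have hxdd' : x.toNat ∣ d.toNat := by
          have h1 : ((x.toNat : Nat) : Int) ∣ ((d.toNat : Nat) : Int) := by
            rw [Int.toNat_of_nonneg hx0, Int.toNat_of_nonneg (by omega : (0:Int) ≤ d)]
            exact hxdd
          exact_mod_cast h1
        rcases hdp.eq_one_or_self_of_dvd _ hxdd' with h1 | h1
        · exact absurd (h1 ▸ hxp) Nat.not_prime_one
        · exact hxe (by omega)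
  · rintro (rfl | ⟨hx0, hxp, hxd⟩)
    · exact ⟨by omega, hdp, hddvd⟩
    · exact ⟨hx0, hxp, hxd.trans hm'dvd⟩

lemma trialFactor_spec (fuel : Nat) : ∀ (m d : Int) (fs : List Int), 2 ≤ d → 1 ≤ m →
    (m + 2 - d).toNat ≤ fuel → (∀ q : Nat, q.Prime → (q : Int) ∣ m → d ≤ (q : Int)) →
    (if 1 < (trialFactor fuel m d fs).2 then (trialFactor fuel m d fs).1 ++ [(trialFactor fuel m d fs).2]
      else (trialFactor fuel m d fs).1) = fs ++ primesList m := by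
  induction fuel with
  | zero =>
    intro m d fs h2 hm hf hall
    have hm1 : m = 1 := by
      by_contra hc
      have hq := Nat.minFac_prime (show m.toNat ≠ 1 by omega)
      have hqd : ((m.toNat.minFac : Nat) : Int) ∣ m := by
        have h : (m.toNat.minFac : Int) ∣ ((m.toNat : Nat) : Int) := by
          exact_mod_cast m.toNat.minFac_dvd
        rwa [Int.toNat_of_nonneg (by omega : (0:Int) ≤ m)] at h
      have hge := hall _ hq hqd
      have hle : m.toNat.minFac ≤ m.toNat := Nat.minFac_le (by omega)
      omega
    subst hm1
    simp only [trialFactor]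
    norm_num [primesList_one]
  | succ f ih =>
    intro m d fs h2 hm hf hall
    have hstep : trialFactor (f + 1) m d fs =
        if d * d ≤ m then
          if PySem.Int.mod m d == 0 then
            trialFactor f (divOutAll m.toNat m d) (d + 1) (fs ++ [d])
          else trialFactor f m (d + 1) fs
        else (fs, m) := rfl
    by_cases hdm : d * d ≤ m
    · by_cases hdvd : d ∣ m
      · have hbeq : (PySem.Int.mod m d == 0) = true := by
          rw [beq_iff_eq]; exact (PySem.Int.mod_eq_zero_iff_dvd m d).mpr hdvd
        rw [hstep, if_pos hdm, hbeq, if_pos rfl]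
        have hdp : d.toNat.Prime := by
          have hq := Nat.minFac_prime (show d.toNat ≠ 1 by omega)
          have hqd : ((d.toNat.minFac : Nat) : Int) ∣ m := by
            have h1 : (d.toNat.minFac : Int) ∣ ((d.toNat : Nat) : Int) := by
              exact_mod_cast d.toNat.minFac_dvd
            rw [Int.toNat_of_nonneg (by omega : (0:Int) ≤ d)] at h1
            exact h1.trans hdvd
          have hge := hall _ hq hqd
          have hle : d.toNat.minFac ≤ d.toNat := Nat.minFac_le (by omega)
          have heq : d.toNat.minFac = d.toNat := by omega
          rw [← heq]
          exact hq
        obtain ⟨e, heq, hnd, hpos⟩ := divOutAll_spec m.toNat m d h2 hm (le_refl _)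
        have he1 : 1 ≤ e := by
          rcases Nat.eq_zero_or_pos e with h | h
          · exfalso
            rw [h, pow_zero, mul_one] at heq
            rw [heq] at hdvd
            exact hnd hdvd
          · exact h
        have hall' : ∀ q : Nat, q.Prime → (q : Int) ∣ divOutAll m.toNat m d → d + 1 ≤ (q : Int) := by
          intro q hq hqd
          have hqm : (q : Int) ∣ m := by
            rw [heq]; exact Dvd.dvd.mul_right hqd (d ^ e)
          have hge := hall q hq hqm
          rcases eq_or_lt_of_le hge with h | h
          · exfalso
            rw [← h] at hqd
            exact hnd hqd
          · omega
        have hde : d ≤ d ^ e := le_self_pow₀ (by omega) (by omega)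
        have hm'le : divOutAll m.toNat m d + 1 ≤ m := by nlinarith
        rw [ih (divOutAll m.toNat m d) (d + 1) (fs ++ [d]) (by omega) hpos (by omega) hall']
        rw [primesList_cons m (divOutAll m.toNat m d) d e h2 hdp heq hnd hpos he1 hall]
        simp
      · have hbeq : (PySem.Int.mod m d == 0) = false := by
          rw [beq_eq_false_iff_ne]
          intro hc
          exact hdvd ((PySem.Int.mod_eq_zero_iff_dvd m d).mp hc)
        rw [hstep, if_pos hdm, hbeq]
        simp only [Bool.false_eq_true, if_false]
        have hall' : ∀ q : Nat, q.Prime → (q : Int) ∣ m → d + 1 ≤ (q : Int) := by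
          intro q hq hqd
          have hge := hall q hq hqd
          rcases eq_or_lt_of_le hge with h | h
          · exfalso
            rw [← h] at hqd
            exact hdvd hqd
          · omega
        exact ih m (d + 1) fs (by omega) hm (by omega) hall'
    · rw [hstep, if_neg hdm]
      rcases eq_or_lt_of_le hm with h1 | h1
      · rw [← h1]
        norm_num [primesList_one]
      · have hmp : m.toNat.Prime := by
          by_contra hc
          have hq := Nat.minFac_prime (show m.toNat ≠ 1 by omega)
          have hsq : m.toNat.minFac ^ 2 ≤ m.toNat := Nat.minFac_sq_le_self (by omega) hc
          have hqd : ((m.toNat.minFac : Nat) : Int) ∣ m := by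
            have h : (m.toNat.minFac : Int) ∣ ((m.toNat : Nat) : Int) := by
              exact_mod_cast m.toNat.minFac_dvd
            rwa [Int.toNat_of_nonneg (by omega : (0:Int) ≤ m)] at h
          have hge := hall _ hq hqd
          apply hdm
          have hd0 : (0:Int) ≤ d := by omega
          calc d * d ≤ ((m.toNat.minFac : Nat) : Int) * ((m.toNat.minFac : Nat) : Int) :=
                mul_le_mul hge hge hd0 (le_trans hd0 hge)
            _ = ((m.toNat.minFac * m.toNat.minFac : Nat) : Int) := by push_cast; ring
            _ ≤ ((m.toNat : Nat) : Int) := by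
                have h := hsq
                have h2' : m.toNat.minFac * m.toNat.minFac ≤ m.toNat := by nlinarith
                exact_mod_cast h2'
            _ = m := Int.toNat_of_nonneg (by omega)
        rw [primesList_self_of_prime m (by omega) hmp]
        rw [if_pos (by omega : (1:Int) < m)]

def ReachesProp (ps : List Int) (p0 k : Int) : Prop :=
  ∃ j : Nat, 2 ≤ k - (j : Int) * p0 ∧ ∃ p ∈ ps, p ∣ (k - (j : Int) * p0)

lemma reachesProp_false (ps : List Int) (p0 k : Int) (hp0 : 0 ≤ p0) (hk : k ≤ 1) :
    ¬ ReachesProp ps p0 k := by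
  rintro ⟨j, h2, _⟩
  have h := mul_nonneg (Int.natCast_nonneg j) hp0
  omega

lemma reachesProp_step (ps : List Int) (p0 k : Int) (hnd : ¬ ∃ p ∈ ps, p ∣ k) :
    (ReachesProp ps p0 k ↔ ReachesProp ps p0 (k - p0)) := by
  constructor
  · rintro ⟨j, h2, p, hp, hd⟩
    cases j with
    | zero => exact absurd ⟨p, hp, by simpa using hd⟩ hnd
    | succ j' =>
      refine ⟨j', by push_cast at h2 ⊢; linarith, p, hp, ?_⟩
      have he : k - ((j' + 1 : Nat) : Int) * p0 = k - p0 - (j' : Int) * p0 := by push_cast; ring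
      rwa [he] at hd
  · rintro ⟨j, h2, p, hp, hd⟩
    refine ⟨j + 1, by push_cast at h2 ⊢; linarith, p, hp, ?_⟩
    have he : k - ((j + 1 : Nat) : Int) * p0 = k - p0 - (j : Int) * p0 := by push_cast; ring
    rwa [he]

lemma recA_spec (ps : List Int) (p0 : Int) (tl : List Int) (hps : ps = p0 :: tl)
    (hprime : ∀ p ∈ ps, 0 ≤ p ∧ p.toNat.Prime) :
    ∀ (fuel : Nat) (k : Int), k.toNat < fuel →
      (centrifugeRecursion fuel k ps = true ↔ ReachesProp ps p0 k) := by
  have hp0 : 2 ≤ p0 := by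
    have h := hprime p0 (by rw [hps]; exact List.mem_cons_self)
    have h2 := h.2.two_le
    omega
  intro fuel
  induction fuel with
  | zero => intro k hk; omega
  | succ f ih =>
    intro k hk
    have hstep : centrifugeRecursion (f + 1) k ps =
        (if k == 1 then false
        else if decide (1 < k) then
          if ps.contains k then true
          else if (List.range ps.length).any (fun i => PySem.Int.mod k (ps.getD i 0) == 0) then true
          else centrifugeRecursion f (k - ps.getD 0 0) ps
        else false) := rfl
    by_cases hk1 : k = 1
    · rw [hstep, if_pos (by simp [hk1])]
      exact iff_of_false (by simp) (reachesProp_false ps p0 k (by omega) (by omega))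
    · rw [hstep, if_neg (by simp [hk1])]
      by_cases hk2 : 1 < k
      · rw [if_pos (by simpa using hk2)]
        have hanyiff : ((List.range ps.length).any (fun i => PySem.Int.mod k (ps.getD i 0) == 0) = true)
            ↔ ∃ p ∈ ps, p ∣ k := by
          rw [List.any_eq_true]
          constructor
          · rintro ⟨i, hi, hbi⟩
            rw [List.mem_range] at hi
            rw [List.getD_eq_getElem ps 0 hi] at hbi
            exact ⟨ps[i], List.getElem_mem hi, (PySem.Int.mod_eq_zero_iff_dvd _ _).mp (by simpa using hbi)⟩
          · rintro ⟨p, hp, hd⟩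
            obtain ⟨i, hi, rfl⟩ := List.mem_iff_getElem.mp hp
            refine ⟨i, List.mem_range.mpr hi, ?_⟩
            rw [List.getD_eq_getElem ps 0 hi]
            simpa using (PySem.Int.mod_eq_zero_iff_dvd k ps[i]).mpr hd
        by_cases hmem : ps.contains k = true
        · rw [if_pos hmem]
          exact iff_of_true rfl ⟨0, by push_cast; omega, k, List.contains_iff_mem.mp hmem,
            by simpa using dvd_refl k⟩
        · rw [if_neg hmem]
          by_cases hany : (List.range ps.length).any (fun i => PySem.Int.mod k (ps.getD i 0) == 0) = true
          · rw [if_pos hany]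
            obtain ⟨p, hp, hd⟩ := hanyiff.mp hany
            exact iff_of_true rfl ⟨0, by push_cast; omega, p, hp, by simpa using hd⟩
          · rw [if_neg hany]
            have hget0 : ps.getD 0 0 = p0 := by rw [hps]; rfl
            have hlt : (k - p0).toNat < f := by clear hstep hanyiff; omega
            rw [hget0, ih (k - p0) hlt]
            exact (reachesProp_step ps p0 k (fun hc => hany (hanyiff.mpr hc))).symm
      · rw [if_neg (by simpa using hk2)]
        exact iff_of_false (by simp) (reachesProp_false ps p0 k (by omega) (by omega))

lemma recB_spec (ps : List Int) (p0 : Int) (tl : List Int) (hps : ps = p0 :: tl)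
    (hprime : ∀ p ∈ ps, 0 ≤ p ∧ p.toNat.Prime) (hsort : ps.Pairwise (· < ·)) (k : Int) :
    (reaches k ps = true ↔ ReachesProp ps p0 k) := by
  have hp0 : 2 ≤ p0 := by
    have h := hprime p0 (by rw [hps]; exact List.mem_cons_self)
    have h2 := h.2.two_le
    omega
  rw [reaches]
  by_cases hk1 : k ≤ 1
  · rw [if_pos (by simpa using hk1)]
    exact iff_of_false (by simp) (reachesProp_false ps p0 k (by omega) hk1)
  · rw [if_neg (by simpa using hk1)]
    have hget0 : ps.getD 0 0 = p0 := by rw [hps]; rfl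
    simp only [hget0]
    by_cases hdvd0 : p0 ∣ k
    · rw [if_pos (by rw [beq_iff_eq]; exact (PySem.Int.mod_eq_zero_iff_dvd k p0).mpr hdvd0)]
      exact iff_of_true rfl ⟨0, by push_cast; omega, p0, by rw [hps]; exact List.mem_cons_self,
        by simpa using hdvd0⟩
    · rw [if_neg (by
        rw [beq_iff_eq]
        intro hc
        exact hdvd0 ((PySem.Int.mod_eq_zero_iff_dvd k p0).mp hc))]
      have hdrop : ps.drop 1 = tl := by rw [hps]; rfl
      rw [hdrop, List.any_eq_true]
      constructor
      · rintro ⟨p, hp, hmatch⟩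
        rcases hfind : (List.range p.toNat).find? (fun (j : Nat) => PySem.Int.mod (k - (j : Int) * p0) p == 0) with _ | j
        · rw [hfind] at hmatch; simp at hmatch
        · rw [hfind] at hmatch
          have hpred := List.find?_some hfind
          have hdp : p ∣ (k - (j : Int) * p0) :=
            (PySem.Int.mod_eq_zero_iff_dvd _ _).mp (by simpa using hpred)
          exact ⟨j, by simpa using hmatch, p, by rw [hps]; exact List.mem_cons_of_mem p0 hp, hdp⟩
      · rintro ⟨j, h2, p, hpmem, hd⟩
        have hpmem' : p ∈ tl := by
          rw [hps] at hpmem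
          rcases List.mem_cons.mp hpmem with rfl | h
          · exfalso
            apply hdvd0
            have h1 : p ∣ (j : Int) * p := dvd_mul_left p (j : Int)
            have h3 := dvd_add hd h1
            simpa using h3
          · exact h
        have hpinfo := hprime p (by rw [hps]; exact List.mem_cons_of_mem p0 hpmem')
        have hp2 : 2 ≤ p := by
          have := hpinfo.2.two_le
          omega
        have hplt : p0 < p := by
          rw [hps] at hsort
          exact (List.pairwise_cons.mp hsort).1 p hpmem'
        have hpprime : Prime p := by
          have h := Nat.prime_iff_prime_int.mp hpinfo.2
          rwa [Int.toNat_of_nonneg (by omega)] at h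
        have hkey : ∀ x : Int, p ∣ x * p0 → p ∣ x := by
          intro x hx
          rcases hpprime.dvd_mul.mp hx with h | h
          · exact h
          · exfalso
            have := Int.le_of_dvd (by omega) h
            omega
        refine ⟨p, hpmem', ?_⟩
        have hpnat : ((p.toNat : Nat) : Int) = p := Int.toNat_of_nonneg (by omega)
        have hptpos : 0 < p.toNat := by omega
        have hj0mem : j % p.toNat ∈ List.range p.toNat := List.mem_range.mpr (Nat.mod_lt j hptpos)
        have hj0pred : (PySem.Int.mod (k - ((j % p.toNat : Nat) : Int) * p0) p == 0) = true := by
          rw [beq_iff_eq, PySem.Int.mod_eq_zero_iff_dvd]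
          have hje : (j : Int) - ((j % p.toNat : Nat) : Int)
              = ((p.toNat : Nat) : Int) * ((j / p.toNat : Nat) : Int) := by
            have h0 := Nat.div_add_mod j p.toNat
            have h2 : ((p.toNat : Nat) : Int) * ((j / p.toNat : Nat) : Int)
                + ((j % p.toNat : Nat) : Int) = (j : Int) := by exact_mod_cast congrArg (fun x : Nat => (x : Int)) h0
            linarith
          have hsplit : k - ((j % p.toNat : Nat) : Int) * p0
              = (k - (j : Int) * p0) + (((p.toNat : Nat) : Int) * ((j / p.toNat : Nat) : Int)) * p0 := by
            have h3 : ((j % p.toNat : Nat) : Int) * p0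
                = (j : Int) * p0 - (((p.toNat : Nat) : Int) * ((j / p.toNat : Nat) : Int)) * p0 := by
              rw [← sub_mul, ← hje]
              ring
            rw [h3]
            ring
          rw [hsplit]
          have h4 : p ∣ (((p.toNat : Nat) : Int) * ((j / p.toNat : Nat) : Int)) * p0 := by
            rw [hpnat]
            exact Dvd.dvd.mul_right (dvd_mul_right p _) p0
          exact dvd_add hd h4
        have hsome : ((List.range p.toNat).find?
            (fun (j : Nat) => PySem.Int.mod (k - (j : Int) * p0) p == 0)).isSome = true :=
          List.find?_isSome.mpr ⟨j % p.toNat, hj0mem, hj0pred⟩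
        obtain ⟨jf, hfind⟩ := Option.isSome_iff_exists.mp hsome
        rw [hfind]
        have hpredf := List.find?_some hfind
        have hdf : p ∣ (k - (jf : Int) * p0) :=
          (PySem.Int.mod_eq_zero_iff_dvd _ _).mp (by simpa using hpredf)
        have hjflt : jf < p.toNat := List.mem_range.mp (List.mem_of_find?_eq_some hfind)
        have hjfle : (jf : Int) ≤ (j : Int) := by
          by_contra hc
          push_neg at hc
          have hdiff : p ∣ ((jf : Int) - (j : Int)) * p0 := by
            have h := dvd_sub hd hdf
            have he : (k - (j : Int) * p0) - (k - (jf : Int) * p0) = ((jf : Int) - (j : Int)) * p0 := by ring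
            rwa [he] at h
          have h4 := hkey _ hdiff
          have h5 := Int.le_of_dvd (by omega) h4
          omega
        have hle : (jf : Int) * p0 ≤ (j : Int) * p0 := by
          apply mul_le_mul_of_nonneg_right hjfle (by omega)
        simp only [decide_eq_true_eq]
        omega

-- ===== VERDICT (by name: the statement is the Claim_ definition above) =====
theorem centrifuge_spec : Claim_equal_centrifuge := by
  intro n k hdom hpre
  unfold Spec_centrifuge
  by_cases hguard : (k == 0 || k == n) = true
  · rw [centrifuge, centrifuge_alt, if_pos hguard, if_pos hguard]
  · have hguard' : (k == 0 || k == n) = false := by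
      rcases Bool.eq_false_or_eq_true (k == 0 || k == n) with h | h
      · exact absurd h hguard
      · exact h
    have hk0 : k ≠ 0 := by
      intro h; exact hguard (by simp [h])
    have hkn : k ≠ n := by
      intro h; exact hguard (by simp [h])
    have hn0 : 0 ≤ n := by
      rcases hpre with h | h | h
      · exact absurd h hk0
      · exact absurd h hkn
      · exact h
    simp only [centrifuge, centrifuge_alt, hguard', Bool.false_eq_true, if_false]
    have hn3 : n = 0 ∨ n = 1 ∨ 2 ≤ n := by omega
    rcases hn3 with rfl | rfl | hn2
    · have hA : (sieveOfPrimesUpTo 0).getD (Int.toNat 0) false = true := by rw [sieveArr_getD]; decide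
      have hBfs : (if decide ((1 : Int) < (trialFactor (Int.toNat 0 + 2) 0 2 []).2) then
            (trialFactor (Int.toNat 0 + 2) 0 2 []).1 ++ [(trialFactor (Int.toNat 0 + 2) 0 2 []).2]
          else (trialFactor (Int.toNat 0 + 2) 0 2 []).1) = ([] : List Int) := by decide
      rw [hA, hBfs]
      simp
    · have hA : (sieveOfPrimesUpTo 1).getD (Int.toNat 1) false = true := by rw [sieveArr_getD]; decide
      have hBfs : (if decide ((1 : Int) < (trialFactor (Int.toNat 1 + 2) 1 2 []).2) then
            (trialFactor (Int.toNat 1 + 2) 1 2 []).1 ++ [(trialFactor (Int.toNat 1 + 2) 1 2 []).2]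
          else (trialFactor (Int.toNat 1 + 2) 1 2 []).1) = ([] : List Int) := by decide
      rw [hA, hBfs]
      simp
    · have hTF := trialFactor_spec (n.toNat + 2) n 2 [] (le_refl 2) (by omega) (by omega)
        (fun q hq _ => by exact_mod_cast hq.two_le)
      rw [List.nil_append] at hTF
      have hfs : (if decide (1 < (trialFactor (n.toNat + 2) n 2 []).2) then
            (trialFactor (n.toNat + 2) n 2 []).1 ++ [(trialFactor (n.toNat + 2) n 2 []).2]
          else (trialFactor (n.toNat + 2) n 2 []).1) = primesList n := by
        simp only [decide_eq_true_eq]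
        exact hTF
      by_cases hp : n.toNat.Prime
      · have hA : (sieveOfPrimesUpTo n).getD n.toNat false = true :=
          (sieve_spec n hn2 n.toNat (le_refl _)).mpr (Or.inr hp)
        rw [hfs, primesList_self_of_prime n hn2 hp, hA]
        simp
      · have hA : (sieveOfPrimesUpTo n).getD n.toNat false = false := by
          rcases Bool.eq_false_or_eq_true ((sieveOfPrimesUpTo n).getD n.toNat false) with h | h
          · exfalso
            rcases (sieve_spec n hn2 n.toNat (le_refl _)).mp h with h2 | h2
            · omega
            · exact hp h2
          · exact h
        rw [hfs, hA]
        simp only [Bool.false_eq_true, if_false]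
        rw [factors_A_eq n hn2 hp]
        have hmemF : ((n.toNat.minFac : Nat) : Int) ∈ primesList n := by
          refine (mem_primesList _ n (by omega)).mpr ⟨Int.natCast_nonneg _, ?_, ?_⟩
          · simpa using Nat.minFac_prime (show n.toNat ≠ 1 by omega)
          · have h : (n.toNat.minFac : Int) ∣ ((n.toNat : Nat) : Int) := by
              exact_mod_cast n.toNat.minFac_dvd
            rwa [Int.toNat_of_nonneg (by omega)] at h
        have hne : primesList n ≠ [] := by
          intro h
          rw [h] at hmemF
          exact absurd hmemF (List.not_mem_nil)
        have hg1 : (primesList n == ([] : List Int)) = false := by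
          rw [beq_eq_false_iff_ne]; exact hne
        have hg2 : (primesList n == [n]) = false := by
          rw [beq_eq_false_iff_ne]
          intro h
          have hnn : n ∈ primesList n := by rw [h]; exact List.mem_singleton.mpr rfl
          exact hp ((mem_primesList n n (by omega)).mp hnn).2.1
        rw [hg1, hg2]
        simp only [Bool.or_self, Bool.false_eq_true, if_false]
        rcases hcons : primesList n with _ | ⟨p0, tl⟩
        · exact absurd hcons hne
        · have hprimeAll : ∀ p ∈ primesList n, 0 ≤ p ∧ p.toNat.Prime := by
            intro p hp'
            have h := (mem_primesList p n (by omega)).mp hp'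
            exact ⟨h.1, h.2.1⟩
          have hprimeAll2 : ∀ p ∈ p0 :: tl, 0 ≤ p ∧ p.toNat.Prime := hcons ▸ hprimeAll
          have hsort2 : (p0 :: tl).Pairwise (· < ·) := hcons ▸ pairwise_primesList n
          have e1 : centrifugeRecursion (k.toNat + 1) k (p0 :: tl) = reaches k (p0 :: tl) :=
            Bool.eq_iff_iff.mpr ((recA_spec (p0 :: tl) p0 tl rfl hprimeAll2 (k.toNat + 1) k
              (by omega)).trans (recB_spec (p0 :: tl) p0 tl rfl hprimeAll2 hsort2 k).symm)
          have e2 : centrifugeRecursion ((n - k).toNat + 1) (n - k) (p0 :: tl) = reaches (n - k) (p0 :: tl) :=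
            Bool.eq_iff_iff.mpr ((recA_spec (p0 :: tl) p0 tl rfl hprimeAll2 ((n - k).toNat + 1) (n - k)
              (by omega)).trans (recB_spec (p0 :: tl) p0 tl rfl hprimeAll2 hsort2 (n - k)).symm)
          rw [e1, e2]
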